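-- pv_equiv track=rewrite | github.com/fredrikzellerR/bacc | code/abba_musical_eval.py | korrigiere_modulationsdata
-- ===== SOURCE A (Python) =====
-- class ModulationsData():
--     def __init__(self,md):
--         self.md = md;
--         self.iterator_hinmod = 0;
--         self.iterator_rueckmod = 0;
--     def get_hinmodulationen(self):
--         return self.md[0];
--     def get_rueckmodulationen(self):
--         return self.md[1];
--     def get_from_beat(self, modlists, i_data, i_beat):# rekursiv ;
--         # moddata = listoflists [[24,43,44...],[...] ] entweder Liste der hina oder Liste der Ruecks
--         # returnt liste >= geforderter beat ab i_data
--         if modlists is None: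
--             return -1,i_data;
--         if i_data >= len(modlists):
--             return -1,i_data;
--         li = modlists[i_data];
--         if li is None:
--             return  -1,i_data;
--         if len(li) == 0:
--             return  -1,i_data;
--         #hier.....
--         if (li[0] >= i_beat):
--             return li[0],i_data;
--         return  self.get_from_beat(modlists, i_data + 1, i_beat );
--
--     def nextHinmod(self):
--         hinmods = self.get_hinmodulationen();
--         if len(hinmods) <= self.iterator_hinmod :
--             return None;
--         else:
--             hm = hinmods[self.iterator_hinmod];
--             self.iterator_hinmod += 1;
--             return hm;
--     def nextRueckmod(self):
--         rueckmods = self.get_rueckmodulationen();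
--         if len(rueckmods) <= self.iterator_rueckmod :
--             return None;
--         else:
--             rm = rueckmods[self.iterator_rueckmod];
--             self.iterator_rueckmod += 1;
--             return rm;
--
-- def korrigiere_modulationsdata(modulationsdata):
--     #A es gibt keine hinmod => alle rueckmods ungültig. (Wurden hinmods ev nicht erkannt) (Arpeggio ?)
--     if len(modulationsdata[0]) == 0:
--         return [[],[]];
--
--     new_hinmods =[];
--     new_rueckmods = [];
--     hinmods = ModulationsData(modulationsdata).get_hinmodulationen();
--     rueckmods = ModulationsData(modulationsdata).get_rueckmodulationen()
--     # Folge hin... rueck, ... hin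
--     # Neubau: solange hinmodulation existiert, nächste rüeckmod bestätigen
--     #B
--     #wenn eine Hinmod existiert, werden alle weiteren Hinmods bis zur nächsten Rueckmod gekillt.
--     # besser direkte intepolation ? siehe check.
--     ih = 0;
--     ir = 0;
--     i_beat_hin = 0;
--     i_beat_hin , ih =  ModulationsData(None).get_from_beat(hinmods,ih, i_beat_hin);#
--
--     while i_beat_hin != -1: # es existiert eine hinmod
--         # neubau :
--         new_hinmods.append(hinmods[ih]);
--         #suche nächste rueckmod >  i_beat_hin
--         i_beat_rueck, ir = ModulationsData(None).get_from_beat(rueckmods,ir,i_beat_hin);# rueckmod_index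
--
--         if i_beat_rueck == -1: # gibts nicht => fertig
--             break;
--         else:
--             # neubau
--             new_rueckmods.append(rueckmods[ir]);
--
--         #iter : next hinmod > ibeat rueck
--         i_beat_hin , ih = ModulationsData(None).get_from_beat(hinmods,ih,i_beat_rueck); #
--     return [new_hinmods,new_rueckmods ];
-- ===== SOURCE B (Python) =====
-- # Flat re-implementation: no helper class, no recursion, no -1 sentinel.
-- # The scans of A stop for good at the first empty sublist, so we truncate both
-- # lists there once, then alternate plain index scans with never-resetting pointers.
-- def _bis_erste_leere(lists):
--     out = []
--     for li in lists:
--         if not li: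
--             break
--         out.append(li)
--     return out
--
-- def korrigiere_modulationsdata(modulationsdata):
--     hin = modulationsdata[0]
--     if not hin:
--         return [[], []]
--     rueck = modulationsdata[1]
--     hin = _bis_erste_leere(hin)
--     rueck = _bis_erste_leere(rueck)
--     new_hin, new_rueck = [], []
--     ih = ir = 0
--     beat = 0
--     while True:
--         while ih < len(hin) and hin[ih][0] < beat:
--             ih += 1
--         if ih == len(hin):
--             break
--         new_hin.append(hin[ih])
--         beat = hin[ih][0]
--         while ir < len(rueck) and rueck[ir][0] < beat:
--             ir += 1
--         if ir == len(rueck):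
--             break
--         new_rueck.append(rueck[ir])
--         beat = rueck[ir][0]
--     return [new_hin, new_rueck]
-- ===== Notes on version B (the rewrite author's own statement) =====
-- stated objective: simpler
-- what changed: Drops the ModulationsData helper class and the recursive -1-sentinel search: B truncates both lists once at the first empty sublist and then runs a flat while-loop alternating plain index scans with never-resetting pointers.
-- outside the precondition, e.g. on korrigiere_modulationsdata([[[2], [1]], [[1]]]): A returns [[[2]], []], B returns [[[2]], []]
import Mathlib
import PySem

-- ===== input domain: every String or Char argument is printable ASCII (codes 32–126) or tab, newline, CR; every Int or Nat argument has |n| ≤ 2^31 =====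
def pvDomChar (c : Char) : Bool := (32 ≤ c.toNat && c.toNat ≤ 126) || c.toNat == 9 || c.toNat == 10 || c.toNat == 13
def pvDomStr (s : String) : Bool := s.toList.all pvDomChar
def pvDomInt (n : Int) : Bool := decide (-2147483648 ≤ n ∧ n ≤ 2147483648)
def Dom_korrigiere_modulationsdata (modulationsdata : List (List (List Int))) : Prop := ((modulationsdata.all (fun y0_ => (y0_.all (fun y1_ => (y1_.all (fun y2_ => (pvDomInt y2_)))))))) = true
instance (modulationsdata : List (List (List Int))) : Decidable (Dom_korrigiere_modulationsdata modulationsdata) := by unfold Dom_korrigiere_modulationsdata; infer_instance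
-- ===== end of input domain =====

-- B drops A's helper class and recursive sentinel search: it truncates both lists at the
-- first empty sublist once and then alternates plain index scans (simpler; same cost).
-- Equivalence is proved on Pre_ (A raises / can loop forever outside it).

-- ===== PORT A =====
-- get_from_beat: the 'modlists is None' / 'li is None' branches cannot arise under the
-- type List (List Int) and are omitted; the index i is kept as a Nat (it is 0-based and
-- only ever incremented in the Python).  xs.getD i [] is xs[i], in range since ¬ xs.length ≤ i.
def getFromBeatA (xs : List (List Int)) (i : Nat) (beat : Int) : Int × Nat :=
  if xs.length ≤ i then (-1, i)
  else
    match xs.getD i [] with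
    | [] => (-1, i)
    | x :: _ => if x ≥ beat then (x, i) else getFromBeatA xs (i + 1) beat
termination_by xs.length - i
decreasing_by omega

-- the while-loop of A; fuel only makes the recursion total (inside Pre_ the loop runs at
-- most hin.length + 1 times, so the fuel the port passes is never exhausted there).
-- hin.getD ih [] / rueck.getD r.2 [] are hinmods[ih] / rueckmods[ir], in range whenever the
-- corresponding beat is not -1.
def loopA (hin rueck : List (List Int)) (fuel : Nat) (ih ir : Nat) (bh : Int)
    (nh nr : List (List Int)) : List (List (List Int)) :=
  match fuel with
  | 0 => [nh, nr]
  | f + 1 =>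
    if bh = -1 then [nh, nr]
    else
      let nh' := nh ++ [hin.getD ih []]
      let r := getFromBeatA rueck ir bh
      if r.1 = -1 then [nh', nr]
      else
        let nr' := nr ++ [rueck.getD r.2 []]
        let h2 := getFromBeatA hin ih r.1
        loopA hin rueck f h2.2 r.2 h2.1 nh' nr'

def korrigiere_modulationsdata (modulationsdata : List (List (List Int))) : List (List (List Int)) :=
  match modulationsdata with
  | [] => []                -- modulationsdata[0] raises IndexError: outside Pre_, value arbitrary
  | [hin] =>
    if hin = [] then [[], []]
    else []                 -- modulationsdata[1] raises IndexError: outside Pre_, value arbitrary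
  | hin :: rueck :: _ =>
    if hin = [] then [[], []]
    else
      let h0 := getFromBeatA hin 0 0
      loopA hin rueck (hin.length + 1) h0.2 0 h0.1 [] []

-- ===== PORT B =====
-- _bis_erste_leere of Source B
def truncB : List (List Int) → List (List Int)
  | [] => []
  | li :: rest => if li = [] then [] else li :: truncB rest

-- the inner 'while i < len(xs) and xs[i][0] < beat: i += 1' of Source B
def scanB (xs : List (List Int)) (i : Nat) (beat : Int) : Nat :=
  if i < xs.length then
    if (xs.getD i []).headD 0 < beat then scanB xs (i + 1) beat else i
  else i
termination_by xs.length - i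
decreasing_by omega

-- the 'while True' loop of Source B (fuel only makes it total; never exhausted inside Pre_)
def loopB (hin rueck : List (List Int)) (fuel : Nat) (ih ir : Nat) (beat : Int)
    (nh nr : List (List Int)) : List (List (List Int)) :=
  match fuel with
  | 0 => [nh, nr]
  | f + 1 =>
    let i := scanB hin ih beat
    if hin.length ≤ i then [nh, nr]
    else
      let li := hin.getD i []
      let nh' := nh ++ [li]
      let j := scanB rueck ir (li.headD 0)
      if rueck.length ≤ j then [nh', nr]
      else
        let rj := rueck.getD j []
        loopB hin rueck f i j (rj.headD 0) nh' (nr ++ [rj])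

def korrigiere_modulationsdata_alt (modulationsdata : List (List (List Int))) : List (List (List Int)) :=
  match modulationsdata with
  | [] => [[], []]          -- modulationsdata[0] raises IndexError: outside Pre_, value arbitrary
  | [hin] =>
    if hin = [] then [[], []]
    else [[], []]           -- modulationsdata[1] raises IndexError: outside Pre_, value arbitrary
  | hin :: rueck :: _ =>
    if hin = [] then [[], []]
    else loopB (truncB hin) (truncB rueck) (hin.length + 1) 0 0 0 [] []

-- ===== PRECONDITION & SPEC =====
-- Pre_ excludes (a) inputs of outer length < 2 with a nonempty first row, or the empty
-- outer list, where Python A raises IndexError, and (b) inputs where a non-negative head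
-- of some hin-sublist equals the head of some rueck-sublist, on which Python A can loop
-- forever (its confirmed beats are always ≥ 0, so negative or empty sublists never
-- collide, and a rueck list starting with an empty sublist always breaks the loop);
-- (b) is a closed-form sufficient condition for A's termination and is slightly wider
-- than the exact divergence set (see the cites in claim.json).
def Pre_korrigiere_modulationsdata (modulationsdata : List (List (List Int))) : Prop :=
  modulationsdata ≠ [] ∧
    (modulationsdata.getD 0 [] = [] ∨
      (2 ≤ modulationsdata.length ∧
        ((modulationsdata.getD 1 []).getD 0 [] = [] ∨
          ∀ a ∈ modulationsdata.getD 0 [], ∀ b ∈ modulationsdata.getD 1 [],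
            a = [] ∨ b = [] ∨ a.headD 0 < 0 ∨ b.headD 0 < 0 ∨ a.headD 0 ≠ b.headD 0)))
instance (modulationsdata : List (List (List Int))) : Decidable (Pre_korrigiere_modulationsdata modulationsdata) := by unfold Pre_korrigiere_modulationsdata; infer_instance

def pvWitness_korrigiere_modulationsdata : List (List (List Int)) := [[[0]], [[1]]]

def Spec_korrigiere_modulationsdata (modulationsdata : List (List (List Int))) (out : List (List (List Int))) : Prop := out = korrigiere_modulationsdata_alt modulationsdata
instance (modulationsdata : List (List (List Int))) (out : List (List (List Int))) : Decidable (Spec_korrigiere_modulationsdata modulationsdata out) := by unfold Spec_korrigiere_modulationsdata; infer_instance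

-- ===== CLAIM (what is proved, stated in full; the proofs are below) =====
def Claim_equal_korrigiere_modulationsdata : Prop := ∀ (modulationsdata : List (List (List Int))), Dom_korrigiere_modulationsdata modulationsdata → Pre_korrigiere_modulationsdata modulationsdata → Spec_korrigiere_modulationsdata modulationsdata (korrigiere_modulationsdata modulationsdata)

-- ===== LEMMAS AND PROOFS =====

lemma truncB_len_le (xs : List (List Int)) : (truncB xs).length ≤ xs.length := by
  induction xs with
  | nil => simp [truncB]
  | cons li rest ih =>
    simp only [truncB]; split
    · simp
    · simp; omega

lemma truncB_getD (xs : List (List Int)) :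
    ∀ j, j < (truncB xs).length →
      (truncB xs).getD j [] = xs.getD j [] ∧ xs.getD j [] ≠ [] := by
  induction xs with
  | nil => simp [truncB]
  | cons li rest ih =>
    intro j hj
    simp only [truncB] at hj ⊢
    by_cases h : li = []
    · simp [h] at hj
    · simp only [if_neg h] at hj ⊢
      cases j with
      | zero => simpa using h
      | succ j => simpa using ih j (by simpa using hj)

lemma truncB_end (xs : List (List Int)) (h : (truncB xs).length < xs.length) :
    xs.getD (truncB xs).length [] = [] := by
  induction xs with
  | nil => simp at h
  | cons li rest ih =>
    simp only [truncB] at h ⊢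
    by_cases hli : li = []
    · simp [hli]
    · simp only [if_neg hli] at h ⊢
      simpa using ih (by simpa using h)

lemma scanB_le (xs : List (List Int)) (beat : Int) :
    ∀ i, i ≤ xs.length → scanB xs i beat ≤ xs.length := by
  intro i
  induction i using scanB.induct (xs := xs) (beat := beat) with
  | case1 i hlt hsm ih => intro _; rw [scanB, if_pos hlt, if_pos hsm]; exact ih (by omega)
  | case2 i hlt hsm => intro _; rw [scanB, if_pos hlt, if_neg hsm]; omega
  | case3 i hlt => intro h; rw [scanB, if_neg hlt]; exact h

lemma scanB_head (xs : List (List Int)) (beat : Int) :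
    ∀ i, scanB xs i beat < xs.length →
      ¬ (xs.getD (scanB xs i beat) []).headD 0 < beat := by
  intro i
  induction i using scanB.induct (xs := xs) (beat := beat) with
  | case1 i hlt hsm ih => rw [scanB, if_pos hlt, if_pos hsm]; exact ih
  | case2 i hlt hsm => rw [scanB, if_pos hlt, if_neg hsm]; intro _; exact hsm
  | case3 i hlt => rw [scanB, if_neg hlt]; intro h; omega

lemma gfb_nil (xs : List (List Int)) (i : Nat) (beat : Int) (hle : ¬ xs.length ≤ i)
    (heq : xs.getD i [] = []) : getFromBeatA xs i beat = (-1, i) := by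
  rw [getFromBeatA, if_neg hle, heq]

lemma gfb_cons (xs : List (List Int)) (i : Nat) (beat : Int) (x : Int) (tl : List Int)
    (hle : ¬ xs.length ≤ i) (heq : xs.getD i [] = x :: tl) :
    getFromBeatA xs i beat = if x ≥ beat then (x, i) else getFromBeatA xs (i + 1) beat := by
  rw [getFromBeatA, if_neg hle, heq]

-- A's recursive search agrees with B's scan over the truncated list: when the scan stops
-- inside the truncated list the two return the same (head, index); when it reaches its
-- end, A's search returns the -1 sentinel.
lemma gfb_eq_scan (xs : List (List Int)) (beat : Int) :
    ∀ i, i ≤ (truncB xs).length →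
      (scanB (truncB xs) i beat < (truncB xs).length →
        getFromBeatA xs i beat =
          (((truncB xs).getD (scanB (truncB xs) i beat) []).headD 0,
            scanB (truncB xs) i beat)) ∧
      ((truncB xs).length ≤ scanB (truncB xs) i beat →
        (getFromBeatA xs i beat).1 = -1) := by
  intro i
  induction i using getFromBeatA.induct (xs := xs) (beat := beat) with
  | case1 i hle =>
    -- i ≥ xs.length : also i ≥ (truncB xs).length, scan stops at i
    intro hi
    have ht := truncB_len_le xs
    have hit : ¬ i < (truncB xs).length := by omega
    rw [scanB, if_neg hit]
    constructor
    · intro h; omega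
    · intro _; rw [getFromBeatA, if_pos hle]
  | case2 i hle heq =>
    -- xs[i] = [] : i is exactly the truncation point
    intro hi
    have hit : ¬ i < (truncB xs).length := by
      intro hlt
      exact (truncB_getD xs i hlt).2 heq
    rw [scanB, if_neg hit]
    constructor
    · intro h; omega
    · intro _; rw [gfb_nil xs i beat hle heq]
  | case3 i hle x tl heq hge =>
    -- xs[i] = x :: tl with x ≥ beat : both stop at i
    intro hi
    have hlt : i < (truncB xs).length := by
      rcases lt_or_eq_of_le hi with h | h
      · exact h
      · exfalso
        have hxl : i < xs.length := by
          by_contra hc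
          rw [List.getD_eq_default] at heq
          · exact absurd heq (by simp)
          · omega
        have := truncB_end xs (by omega)
        rw [← h] at this; rw [this] at heq; exact absurd heq (by simp)
    have hhead : ((truncB xs).getD i []).headD 0 = x := by
      rw [(truncB_getD xs i hlt).1, heq]; rfl
    have hns : ¬ ((truncB xs).getD i []).headD 0 < beat := by rw [hhead]; omega
    rw [scanB, if_pos hlt, if_neg hns]
    constructor
    · intro _; rw [gfb_cons xs i beat x tl hle heq, if_pos hge, hhead]
    · intro h; omega
  | case4 i hle x tl heq hge ih =>
    -- xs[i] = x :: tl with x < beat : both advance to i + 1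
    intro hi
    have hlt : i < (truncB xs).length := by
      rcases lt_or_eq_of_le hi with h | h
      · exact h
      · exfalso
        have hxl : i < xs.length := by
          by_contra hc
          rw [List.getD_eq_default] at heq
          · exact absurd heq (by simp)
          · omega
        have := truncB_end xs (by omega)
        rw [← h] at this; rw [this] at heq; exact absurd heq (by simp)
    have hhead : ((truncB xs).getD i []).headD 0 = x := by
      rw [(truncB_getD xs i hlt).1, heq]; rfl
    have hs : ((truncB xs).getD i []).headD 0 < beat := by rw [hhead]; omega
    rw [scanB, if_pos hlt, if_pos hs]
    rw [gfb_cons xs i beat x tl hle heq, if_neg hge]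
    exact ih (by omega)

-- fuel-aligned equivalence of the two loops: each port consumes one unit of fuel per
-- iteration, with B's scans started where A's previous searches stopped.
lemma loopAB (hin rueck : List (List Int)) :
    ∀ (fuel : Nat) (i0 ir : Nat) (beat : Int) (nh nr : List (List Int)),
      i0 ≤ (truncB hin).length → ir ≤ (truncB rueck).length → 0 ≤ beat →
      loopA hin rueck fuel (getFromBeatA hin i0 beat).2 ir (getFromBeatA hin i0 beat).1 nh nr
        = loopB (truncB hin) (truncB rueck) fuel i0 ir beat nh nr := by
  intro fuel
  induction fuel with
  | zero => intro i0 ir beat nh nr _ _ _; rfl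
  | succ f ihf =>
    intro i0 ir beat nh nr hi0 hir hbeat
    have Lh := gfb_eq_scan hin beat i0 hi0
    have hsle := scanB_le (truncB hin) beat i0 hi0
    rw [loopA, loopB]
    by_cases hfound : scanB (truncB hin) i0 beat < (truncB hin).length
    · -- hin found at index j
      set j := scanB (truncB hin) i0 beat with hj
      have hA := Lh.1 hfound
      have hbh : (getFromBeatA hin i0 beat).1 = ((truncB hin).getD j []).headD 0 := by rw [hA]
      have hih : (getFromBeatA hin i0 beat).2 = j := by rw [hA]
      have hbge : beat ≤ ((truncB hin).getD j []).headD 0 := by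
        have h := scanB_head (truncB hin) beat i0 hfound; rw [← hj] at h; omega
      have hne : ¬ (getFromBeatA hin i0 beat).1 = -1 := by rw [hbh]; omega
      rw [if_neg hne, if_neg (by omega : ¬ (truncB hin).length ≤ j)]
      have helem : hin.getD ((getFromBeatA hin i0 beat).2) [] = (truncB hin).getD j [] := by
        rw [hih, (truncB_getD hin j hfound).1]
      -- rueck side
      have Lr := gfb_eq_scan rueck ((getFromBeatA hin i0 beat).1) ir hir
      have hrsle := scanB_le (truncB rueck) ((getFromBeatA hin i0 beat).1) ir hir
      have hbeq : ((truncB hin).getD j []).headD 0 = (getFromBeatA hin i0 beat).1 := hbh.symm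
      by_cases hrf : scanB (truncB rueck) ir ((getFromBeatA hin i0 beat).1) < (truncB rueck).length
      · set k := scanB (truncB rueck) ir ((getFromBeatA hin i0 beat).1) with hk
        have hR := Lr.1 hrf
        have hbr : (getFromBeatA rueck ir ((getFromBeatA hin i0 beat).1)).1
            = ((truncB rueck).getD k []).headD 0 := by rw [hR]
        have hkk : (getFromBeatA rueck ir ((getFromBeatA hin i0 beat).1)).2 = k := by rw [hR]
        have hbrge : (getFromBeatA hin i0 beat).1 ≤ ((truncB rueck).getD k []).headD 0 := by
          have h := scanB_head (truncB rueck) ((getFromBeatA hin i0 beat).1) ir hrf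
          rw [← hk] at h; omega
        have hrne : ¬ (getFromBeatA rueck ir ((getFromBeatA hin i0 beat).1)).1 = -1 := by
          rw [hbr]; omega
        rw [hbh] at hne
        simp only [hbeq]
        rw [if_neg hrne, if_neg (by omega : ¬ (truncB rueck).length ≤ k)]
        have hrelem : rueck.getD ((getFromBeatA rueck ir ((getFromBeatA hin i0 beat).1)).2) []
            = (truncB rueck).getD k [] := by
          rw [hkk, (truncB_getD rueck k hrf).1]
        rw [helem, hrelem, hkk, hih, hbr]
        exact ihf j k (((truncB rueck).getD k []).headD 0) _ _
          (by omega) (by omega) (by omega)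
      · -- rueck search exhausted: both stop after appending the hin element
        have h1 : (getFromBeatA rueck ir ((getFromBeatA hin i0 beat).1)).1 = -1 :=
          Lr.2 (by omega)
        simp only [hbeq]
        rw [if_pos h1, if_pos (by omega : (truncB rueck).length ≤ scanB (truncB rueck) ir ((getFromBeatA hin i0 beat).1)), helem]
    · -- hin search exhausted: both stop
      have h1 : (getFromBeatA hin i0 beat).1 = -1 := Lh.2 (by omega)
      rw [if_pos h1, if_pos (by omega : (truncB hin).length ≤ scanB (truncB hin) i0 beat)]

-- ===== VERDICT (by name: the statement is the Claim_ definition above) =====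
theorem korrigiere_modulationsdata_spec : Claim_equal_korrigiere_modulationsdata := by
  intro md _ hpre
  obtain ⟨hne, hrest⟩ := hpre
  unfold Spec_korrigiere_modulationsdata
  cases md with
  | nil => exact absurd rfl hne
  | cons hin tl =>
    cases tl with
    | nil =>
      -- Pre_ forces hin = [] here (outer length 2 is impossible)
      unfold korrigiere_modulationsdata korrigiere_modulationsdata_alt
      rcases hrest with h | ⟨h2, _⟩
      · simp only [List.getD_cons_zero] at h
        simp [h]
      · simp at h2
    | cons rueck rest =>
      unfold korrigiere_modulationsdata korrigiere_modulationsdata_alt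
      by_cases h : hin = []
      · simp [h]
      · simp only [if_neg h]
        exact loopAB hin rueck (hin.length + 1) 0 0 0 [] []
          (Nat.zero_le _) (Nat.zero_le _) le_rfl
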